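-- pv_equiv track=rewrite | github.com/weed478/wdi6 | zad15.py | occupancy_map
-- ===== SOURCE A (Python) =====
-- def pos2occupancy(pos, n):
--     row, col = pos
--     diag_up = row + col
--     diag_down = (n - 1 - row) + col
--     return row, col, diag_up, diag_down
--
-- def occupancy_map(placement):
--     n = len(placement)
--     rows = [0] * n
--     cols = [0] * n
--     diags_down = [0] * (n * 2 - 1)  # \
--     diags_up = [0] * (n * 2 - 1)    # /
--
--     for i in range(n):
--         if placement[i] is None:
--             continue
--
--         row, col, diag_up, diag_down = pos2occupancy((i, placement[i]), n)
--
--         rows[row] += 1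
--         cols[col] += 1
--         diags_up[diag_up] += 1
--         diags_down[diag_down] += 1
--
--     return rows, cols, diags_up, diags_down
-- ===== SOURCE B (Python) =====
-- def histogram(keys, size):
--     out = [0] * size
--     ks = sorted(keys)
--     i = 0
--     while i < len(ks):
--         j = i
--         while j < len(ks) and ks[j] == ks[i]:
--             j += 1
--         out[ks[i]] += j - i
--         i = j
--     return out
--
--
-- def occupancy_map(placement):
--     n = len(placement)
--     queens = [(r, c) for r, c in enumerate(placement) if c is not None]
--     rows = histogram([r for r, _ in queens], n)
--     cols = histogram([c for _, c in queens], n)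
--     diags_up = histogram([r + c for r, c in queens], n * 2 - 1)
--     diags_down = histogram([(n - 1 - r) + c for r, c in queens], n * 2 - 1)
--     return rows, cols, diags_up, diags_down
-- ===== Notes on version B (the rewrite author's own statement) =====
-- stated objective: alternative
-- what changed: A's single fused loop that increments four occupancy arrays queen by queen is replaced by a sort-based histogram: B extracts the occupied (row, col) cells once, then builds each of the four arrays by sorting that array's key list and scattering the length of each run of equal keys into its cell.
import Mathlib
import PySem

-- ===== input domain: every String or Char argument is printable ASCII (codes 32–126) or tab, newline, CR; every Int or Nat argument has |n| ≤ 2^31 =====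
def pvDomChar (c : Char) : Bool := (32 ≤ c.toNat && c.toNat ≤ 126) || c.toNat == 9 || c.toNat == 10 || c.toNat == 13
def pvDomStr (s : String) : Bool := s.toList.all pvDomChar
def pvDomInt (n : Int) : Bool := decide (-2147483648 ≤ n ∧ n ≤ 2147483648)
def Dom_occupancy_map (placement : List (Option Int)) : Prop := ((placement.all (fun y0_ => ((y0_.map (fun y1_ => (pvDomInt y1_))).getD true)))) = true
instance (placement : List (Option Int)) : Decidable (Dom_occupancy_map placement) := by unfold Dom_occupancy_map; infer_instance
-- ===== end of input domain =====

-- B replaces A's fused increment loop by a sort-based histogram: extract the queens, and for each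
-- of the four arrays sort its key list and scatter run-lengths of equal keys; alternative algorithm, not faster.


-- ===== PORT A =====
def pos2occupancy (pos : Int × Int) (n : Int) : Int × Int × Int × Int :=
  let row := pos.1
  let col := pos.2
  let diag_up := row + col
  let diag_down := (n - 1 - row) + col
  (row, col, diag_up, diag_down)

def occupancy_map (placement : List (Option Int)) : List Int × List Int × List Int × List Int :=
  let n : Int := PySem.List.len placement
  let rows : List Int := List.replicate n.toNat 0
  let cols : List Int := List.replicate n.toNat 0
  let diags_down : List Int := List.replicate (n * 2 - 1).toNat 0
  let diags_up : List Int := List.replicate (n * 2 - 1).toNat 0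
  let st := (PySem.List.pyRange 0 n 1).foldl (fun s i =>
    match PySem.List.pyGetD placement i none with
    | none => s
    | some v =>
      match pos2occupancy (i, v) n with
      | (row, col, diag_up, diag_down) =>
        (PySem.List.pySetD s.1 row (PySem.List.pyGetD s.1 row 0 + 1),
         PySem.List.pySetD s.2.1 col (PySem.List.pyGetD s.2.1 col 0 + 1),
         PySem.List.pySetD s.2.2.1 diag_up (PySem.List.pyGetD s.2.2.1 diag_up 0 + 1),
         PySem.List.pySetD s.2.2.2 diag_down (PySem.List.pyGetD s.2.2.2 diag_down 0 + 1)))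
    (rows, cols, diags_up, diags_down)
  st

-- ===== PORT B =====
-- the inner while loop of Source B's histogram: consume the sorted key list one maximal run
-- of equal keys at a time, adding each run's length at its key's cell
def scatterRuns (out : List Int) (ks : List Int) : List Int :=
  match ks with
  | [] => out
  | v :: rest =>
    scatterRuns
      (PySem.List.pySetD out v
        (PySem.List.pyGetD out v 0 + (1 + ((rest.takeWhile (fun x => x == v)).length : Int))))
      (rest.dropWhile (fun x => x == v))
termination_by ks.length
decreasing_by
  simp only [List.length_cons]
  exact Nat.lt_succ_of_le (List.length_dropWhile_le _ _)

def histogram (keys : List Int) (size : Int) : List Int :=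
  scatterRuns (List.replicate size.toNat 0) (PySem.List.sorted keys (fun x => x) false)

def occupancy_map_alt (placement : List (Option Int)) : List Int × List Int × List Int × List Int :=
  let n : Int := PySem.List.len placement
  let queens : List (Int × Int) :=
    (PySem.List.enumerate placement).filterMap (fun p => p.2.map (fun c => (p.1, c)))
  (histogram (queens.map (fun p => p.1)) n,
   histogram (queens.map (fun p => p.2)) n,
   histogram (queens.map (fun p => p.1 + p.2)) (n * 2 - 1),
   histogram (queens.map (fun p => (n - 1 - p.1) + p.2)) (n * 2 - 1))

-- ===== PRECONDITION & SPEC =====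
-- Pre_ excludes exactly the placements on which the Python A raises IndexError: a stored
-- column outside [-n, n) makes `cols[col] += 1` (or a diagonal update) index out of range.
def Pre_occupancy_map (placement : List (Option Int)) : Prop :=
  ∀ c ∈ placement.filterMap id,
    -(placement.length : Int) ≤ c ∧ c < (placement.length : Int)
instance (placement : List (Option Int)) : Decidable (Pre_occupancy_map placement) := by
  unfold Pre_occupancy_map; infer_instance

def pvWitness_occupancy_map : List (Option Int) := [some 0, none, some 2]

def Spec_occupancy_map (placement : List (Option Int)) (out : List Int × List Int × List Int × List Int) : Prop := out = occupancy_map_alt placement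
instance (placement : List (Option Int)) (out : List Int × List Int × List Int × List Int) : Decidable (Spec_occupancy_map placement out) := by unfold Spec_occupancy_map; infer_instance

-- ===== CLAIM (what is proved, stated in full; the proofs are below) =====
def Claim_equal_occupancy_map : Prop := ∀ (placement : List (Option Int)), Dom_occupancy_map placement → Pre_occupancy_map placement → Spec_occupancy_map placement (occupancy_map placement)

-- ===== LEMMAS AND PROOFS =====

-- the single-increment step both programs' updates reduce to
def pvIncr (z : List Int) (j : Int) : List Int :=
  PySem.List.pySetD z j (PySem.List.pyGetD z j 0 + 1)

theorem pyIdx_lt_of_some (n : Nat) (i : Int) (p : Nat)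
    (h : PySem.List.pyIdx? n i = some p) : p < n := by
  unfold PySem.List.pyIdx? at h
  split_ifs at h with h1 h2 h3 <;> simp_all <;> omega

theorem pvIncr_of_none (z : List Int) (j : Int)
    (h : PySem.List.pyIdx? z.length j = none) : pvIncr z j = z := by
  simp [pvIncr, PySem.List.pySetD, PySem.List.pySet?, h]

theorem pvIncr_of_some (z : List Int) (j : Int) (p : Nat)
    (h : PySem.List.pyIdx? z.length j = some p) :
    pvIncr z j = z.set p (z.getD p 0 + 1) := by
  have hp := pyIdx_lt_of_some _ _ _ h
  simp [pvIncr, PySem.List.pySetD, PySem.List.pySet?, PySem.List.pyGetD,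
    PySem.List.pyGet?, h, List.getElem?_eq_getElem hp, List.getD]

theorem pvIncr_comm (z : List Int) (j k : Int) :
    pvIncr (pvIncr z j) k = pvIncr (pvIncr z k) j := by
  cases hj : PySem.List.pyIdx? z.length j with
  | none =>
    rw [pvIncr_of_none z j hj]
    cases hk : PySem.List.pyIdx? z.length k with
    | none => rw [pvIncr_of_none z k hk, pvIncr_of_none z j hj]
    | some q =>
      rw [pvIncr_of_some z k q hk,
        pvIncr_of_none _ j (by rwa [List.length_set])]
  | some p =>
    rw [pvIncr_of_some z j p hj]
    cases hk : PySem.List.pyIdx? z.length k with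
    | none =>
      rw [pvIncr_of_none _ k (by rwa [List.length_set]), pvIncr_of_none z k hk,
        pvIncr_of_some z j p hj]
    | some q =>
      have hp := pyIdx_lt_of_some _ _ _ hj
      have hq := pyIdx_lt_of_some _ _ _ hk
      rw [pvIncr_of_some _ k q (by rwa [List.length_set]),
        pvIncr_of_some z k q hk,
        pvIncr_of_some _ j p (by rwa [List.length_set])]
      by_cases hpq : p = q
      · subst hpq
        rfl
      · rw [List.set_comm _ _ (show p ≠ q from hpq)]
        congr 2
        · simp [List.getD_eq_getElem?_getD, List.getElem?_set_ne hpq]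
        · simp [List.getD_eq_getElem?_getD,
            List.getElem?_set_ne (show q ≠ p from fun h => hpq h.symm)]

-- adding a then b at the same cell is adding a+b
theorem pvAdd_pvAdd (z : List Int) (j : Int) (a b : Int) :
    PySem.List.pySetD (PySem.List.pySetD z j (PySem.List.pyGetD z j 0 + a)) j
      (PySem.List.pyGetD (PySem.List.pySetD z j (PySem.List.pyGetD z j 0 + a)) j 0 + b)
    = PySem.List.pySetD z j (PySem.List.pyGetD z j 0 + (a + b)) := by
  cases h : PySem.List.pyIdx? z.length j with
  | none =>
    simp [PySem.List.pySetD, PySem.List.pySet?, h]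
  | some p =>
    have hp := pyIdx_lt_of_some _ _ _ h
    simp only [PySem.List.pySetD, PySem.List.pySet?, PySem.List.pyGetD, PySem.List.pyGet?,
      List.length_set, h, Option.map_some, Option.getD_some, Option.bind]
    rw [List.getElem?_set_self hp, List.set_set]
    simp only [Option.getD_some]
    congr 1
    ring

-- a run of 1 + l.length copies of j folds to a single add of its length
theorem foldl_pvIncr_run (l : List Int) (z : List Int) (j : Int) (hl : ∀ x ∈ l, x = j) :
    List.foldl pvIncr z (j :: l)
      = PySem.List.pySetD z j (PySem.List.pyGetD z j 0 + (1 + (l.length : Int))) := by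
  induction l generalizing z with
  | nil => simp [pvIncr]
  | cons x l ih =>
    have hx : x = j := hl x (by simp)
    rw [hx]
    have hl' : ∀ y ∈ l, y = j := fun y hy => hl y (by simp [hy])
    rw [List.foldl_cons, ih (pvIncr z j) hl']
    have hu : pvIncr z j = PySem.List.pySetD z j (PySem.List.pyGetD z j 0 + 1) := rfl
    rw [hu, pvAdd_pvAdd]
    congr 1
    simp only [List.length_cons]
    push_cast
    ring

theorem scatterRuns_eq_foldl (ks : List Int) (out : List Int) :
    scatterRuns out ks = ks.foldl pvIncr out := by
  generalize hN : ks.length = N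
  induction N using Nat.strong_induction_on generalizing ks out with
  | _ N ih =>
    match ks, hN with
    | [], _ => rw [scatterRuns]; rfl
    | v :: rest, hN =>
      rw [scatterRuns,
        ih (rest.dropWhile (fun x => x == v)).length
          (by rw [← hN]; simp only [List.length_cons];
              exact Nat.lt_succ_of_le (List.length_dropWhile_le _ _)) _ _ rfl]
      conv_rhs => rw [← List.takeWhile_append_dropWhile (p := fun x => x == v) (l := rest)]
      rw [show (v :: (rest.takeWhile (fun x => x == v) ++ rest.dropWhile (fun x => x == v)))
          = (v :: rest.takeWhile (fun x => x == v)) ++ rest.dropWhile (fun x => x == v) from rfl,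
        List.foldl_append,
        foldl_pvIncr_run _ out v (fun x hx => by
          have := List.mem_takeWhile_imp hx
          simpa using this)]

theorem histogram_eq_foldl (keys : List Int) (size : Int) :
    histogram keys size = keys.foldl pvIncr (List.replicate size.toNat 0) := by
  rw [histogram, scatterRuns_eq_foldl]
  exact List.Perm.foldl_eq' (PySem.List.sorted_perm keys (fun x => x) false)
    (fun x _ y _ z => pvIncr_comm z x y) _

-- A's fused fold over (index, entry) pairs equals the four independent per-key folds
theorem occupancy_fused_eq_tallies (n : Int) (l : List (Int × Option Int))
    (a b c d : List Int) :
    l.foldl (fun s p =>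
      match p.2 with
      | none => s
      | some v =>
        match pos2occupancy (p.1, v) n with
        | (row, col, diag_up, diag_down) =>
          (PySem.List.pySetD s.1 row (PySem.List.pyGetD s.1 row 0 + 1),
           PySem.List.pySetD s.2.1 col (PySem.List.pyGetD s.2.1 col 0 + 1),
           PySem.List.pySetD s.2.2.1 diag_up (PySem.List.pyGetD s.2.2.1 diag_up 0 + 1),
           PySem.List.pySetD s.2.2.2 diag_down (PySem.List.pyGetD s.2.2.2 diag_down 0 + 1)))
      (a, b, c, d)
    = (let ps := l.filterMap (fun p => p.2.map (fun c => (p.1, c)))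
       ((ps.map (fun p => p.1)).foldl pvIncr a,
        (ps.map (fun p => p.2)).foldl pvIncr b,
        (ps.map (fun p => p.1 + p.2)).foldl pvIncr c,
        (ps.map (fun p => (n - 1 - p.1) + p.2)).foldl pvIncr d)) := by
  induction l generalizing a b c d with
  | nil => simp
  | cons hd tl ih =>
    obtain ⟨i, oc⟩ := hd
    cases oc with
    | none => simpa using ih a b c d
    | some v => simpa [pos2occupancy, pvIncr] using ih _ _ _ _

theorem occupancy_map_eq_alt (placement : List (Option Int)) :
    occupancy_map placement = occupancy_map_alt placement := by
  have h := occupancy_fused_eq_tallies (PySem.List.len placement)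
    ((PySem.List.pyRange 0 (PySem.List.len placement) 1).map
      (fun j => (j, PySem.List.pyGetD placement j none)))
    (List.replicate (PySem.List.len placement).toNat 0)
    (List.replicate (PySem.List.len placement).toNat 0)
    (List.replicate ((PySem.List.len placement) * 2 - 1).toNat 0)
    (List.replicate ((PySem.List.len placement) * 2 - 1).toNat 0)
  rw [List.foldl_map, List.filterMap_map] at h
  unfold occupancy_map occupancy_map_alt
  rw [PySem.List.enumerate_eq_map_pyRange placement none, List.filterMap_map]
  simp only [histogram_eq_foldl]
  exact h

-- ===== VERDICT (by name: the statement is the Claim_ definition above) =====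
theorem occupancy_map_spec : Claim_equal_occupancy_map := by
  intro placement _ _
  exact occupancy_map_eq_alt placement
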